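-- pv_equiv track=rewrite | github.com/weicj/lucebox-hub-SM75 | dflash/scripts/laguna_pflash_niah.py | _recover_kept_indices
-- ===== SOURCE A (Python) =====
-- def _recover_kept_indices(full_ids: list[int], kept_ids: list[int]) -> list[int]:
--     """Greedy subsequence match: returns positions in full_ids that align with kept_ids in order."""
--     out: list[int] = []
--     j = 0
--     for i, t in enumerate(full_ids):
--         if j < len(kept_ids) and t == kept_ids[j]:
--             out.append(i)
--             j += 1
--     if j != len(kept_ids):
--         raise RuntimeError(f"kept_ids not a subsequence of full_ids ({j}/{len(kept_ids)} matched)")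
--     return out
-- ===== SOURCE B (Python) =====
-- def _recover_kept_indices(full_ids: list[int], kept_ids: list[int]) -> list[int]:
--     """Greedy subsequence match via a token->positions index plus binary search:
--     build a map from each token to its (sorted) occurrence positions in one pass,
--     then for each kept token binary-search that token's position list for the
--     first occurrence at or after the cursor."""
--     positions: dict[int, list[int]] = {}
--     for i, t in enumerate(full_ids):
--         positions.setdefault(t, []).append(i)
--     out: list[int] = []
--     cursor = 0
--     for j, t in enumerate(kept_ids):
--         lst = positions.get(t)
--         if lst is None:
--             raise RuntimeError(f"kept_ids not a subsequence of full_ids ({j}/{len(kept_ids)} matched)")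
--         lo, hi = 0, len(lst)
--         while lo < hi:  # first index in lst with lst[idx] >= cursor
--             mid = (lo + hi) // 2
--             if lst[mid] < cursor:
--                 lo = mid + 1
--             else:
--                 hi = mid
--         if lo == len(lst):
--             raise RuntimeError(f"kept_ids not a subsequence of full_ids ({j}/{len(kept_ids)} matched)")
--         p = lst[lo]
--         out.append(p)
--         cursor = p + 1
--     return out
-- ===== Notes on version B (the rewrite author's own statement) =====
-- stated objective: alternative
-- what changed: B replaces A's single linear scan with an inverted index: one pass builds a token-to-positions map, then each kept token is resolved by binary search in its own position list for the first occurrence at or after a cursor; A's inner per-position comparison loop disappears.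
import Mathlib
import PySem

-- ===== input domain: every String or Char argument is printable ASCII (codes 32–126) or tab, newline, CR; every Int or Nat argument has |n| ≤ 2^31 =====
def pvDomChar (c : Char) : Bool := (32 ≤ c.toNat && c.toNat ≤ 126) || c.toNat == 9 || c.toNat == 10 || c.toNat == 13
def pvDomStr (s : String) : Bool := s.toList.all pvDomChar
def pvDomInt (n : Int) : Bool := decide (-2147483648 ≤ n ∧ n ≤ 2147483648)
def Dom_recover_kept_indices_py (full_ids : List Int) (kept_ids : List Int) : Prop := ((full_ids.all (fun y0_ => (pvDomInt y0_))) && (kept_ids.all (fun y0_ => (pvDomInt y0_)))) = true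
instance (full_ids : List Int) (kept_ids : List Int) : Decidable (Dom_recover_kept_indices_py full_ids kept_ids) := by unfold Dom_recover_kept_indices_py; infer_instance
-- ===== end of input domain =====

-- B re-implements the greedy subsequence alignment with an inverted index
-- (token -> sorted occurrence positions) queried by binary search, instead of
-- A's single linear scan (alternative algorithm, same result).
-- Pre_ excludes inputs where Python A raises RuntimeError (kept_ids not a subsequence).

-- ===== PORT A =====
-- Literal port of A: one pass over enumerate(full_ids) with state (out, j).
def recover_kept_indices_py (full_ids : List Int) (kept_ids : List Int) : List Int :=
  (((PySem.List.enumerate full_ids 0).foldl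
      (fun (s : List Int × Nat) (p : Int × Int) =>
        if s.2 < kept_ids.length ∧ kept_ids.getD s.2 0 = p.2
        then (s.1 ++ [p.1], s.2 + 1) else s)
      ([], 0))).1
  -- Python A raises RuntimeError when j ≠ len(kept_ids); those inputs are outside Pre_.

-- ===== PORT B =====
-- `positions.setdefault(t, []).append(i)` loop of Source B: token -> occurrence list
def pvBuild (full_ids : List Int) : PySem.Dict Int (List Int) :=
  (PySem.List.enumerate full_ids 0).foldl
    (fun d p => d.modify p.2 [] (fun v => v ++ [p.1])) PySem.Dict.empty

-- `while lo < hi: mid = (lo+hi)//2; if lst[mid] < cursor: lo = mid+1 else: hi = mid`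
def pvBS (lst : List Int) (cursor : Int) (lo hi : Nat) : Nat :=
  if lo < hi then
    let mid := (lo + hi) / 2
    if lst.getD mid 0 < cursor then pvBS lst cursor (mid + 1) hi
    else pvBS lst cursor lo mid
  else lo
  termination_by hi - lo
  decreasing_by all_goals omega

-- `for j, t in enumerate(kept_ids)` loop of Source B, carrying the cursor
def pvBGoB (positions : PySem.Dict Int (List Int)) : List Int → Int → List Int
  | [], _ => []
  | t :: rest, cursor =>
    match positions.get? t with
    | none => []  -- Python B raises RuntimeError here (outside Pre_)
    | some lst =>
      let lo := pvBS lst cursor 0 lst.length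
      if lo = lst.length then []  -- Python B raises RuntimeError here (outside Pre_)
      else lst.getD lo 0 :: pvBGoB positions rest (lst.getD lo 0 + 1)

def recover_kept_indices_py_alt (full_ids : List Int) (kept_ids : List Int) : List Int :=
  pvBGoB (pvBuild full_ids) kept_ids 0

-- ===== PRECONDITION & SPEC =====
-- Pre_: exactly the inputs on which Python A returns (greedy matching completes, i.e.
-- kept_ids is a subsequence of full_ids); elsewhere both Pythons raise RuntimeError.
def Pre_recover_kept_indices_py (full_ids : List Int) (kept_ids : List Int) : Prop :=
  kept_ids.Sublist full_ids
instance (full_ids : List Int) (kept_ids : List Int) : Decidable (Pre_recover_kept_indices_py full_ids kept_ids) := by unfold Pre_recover_kept_indices_py; infer_instance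

def pvWitness_recover_kept_indices_py : List Int × List Int := ([5, 1, 2, 1, 3], [1, 1, 3])

def Spec_recover_kept_indices_py (full_ids : List Int) (kept_ids : List Int) (out : List Int) : Prop := out = recover_kept_indices_py_alt full_ids kept_ids
instance (full_ids : List Int) (kept_ids : List Int) (out : List Int) : Decidable (Spec_recover_kept_indices_py full_ids kept_ids out) := by unfold Spec_recover_kept_indices_py; infer_instance

-- ===== CLAIM (what is proved, stated in full; the proofs are below) =====
def Claim_equal_recover_kept_indices_py : Prop := ∀ (full_ids : List Int) (kept_ids : List Int), Dom_recover_kept_indices_py full_ids kept_ids → Pre_recover_kept_indices_py full_ids kept_ids → Spec_recover_kept_indices_py full_ids kept_ids (recover_kept_indices_py full_ids kept_ids)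

-- ===== LEMMAS AND PROOFS =====

-- canonical greedy matcher, referee between the two ports
def pvGreedy : List Int → List Int → Nat → List Int
  | _, [], _ => []
  | [], _ :: _, _ => []
  | f :: fs, k :: ks, i =>
    if f = k then (i : Int) :: pvGreedy fs ks (i + 1) else pvGreedy fs (k :: ks) (i + 1)

-- linear-cursor matcher (referee between pvGreedy and B's binary-search form)
def pvBFind (full_ids : List Int) (t : Int) (pos : Nat) : Nat :=
  if pos < full_ids.length ∧ full_ids.getD pos 0 ≠ t then pvBFind full_ids t (pos + 1) else pos
  termination_by full_ids.length - pos
  decreasing_by omega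

def pvBGo (full_ids : List Int) : List Int → Nat → List Int
  | [], _ => []
  | t :: rest, pos =>
    let p := pvBFind full_ids t pos
    if p = full_ids.length then []
    else (p : Int) :: pvBGo full_ids rest (p + 1)

theorem pvGreedy_nil (full : List Int) (i : Nat) : pvGreedy full [] i = [] := by
  cases full <;> rfl

theorem pvGreedy_nil_left (ks : List Int) (i : Nat) : pvGreedy [] ks i = [] := by
  cases ks <;> rfl

theorem lemA (kept : List Int) :
    ∀ (full : List Int) (j : Nat) (acc : List Int) (i : Nat),
      ((PySem.List.enumerate full (i : Int)).foldl
        (fun (s : List Int × Nat) (p : Int × Int) =>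
          if s.2 < kept.length ∧ kept.getD s.2 0 = p.2
          then (s.1 ++ [p.1], s.2 + 1) else s)
        (acc, j)).1 = acc ++ pvGreedy full (kept.drop j) i := by
  intro full
  induction full with
  | nil => intro j acc i; simp [PySem.List.enumerate_nil, pvGreedy_nil_left]
  | cons f fs ih =>
    intro j acc i
    rw [PySem.List.enumerate_cons]
    by_cases hj : j < kept.length
    · have hdrop : kept.drop j = kept[j] :: kept.drop (j + 1) := List.drop_eq_getElem_cons hj
      have hgetD : kept.getD j 0 = kept[j] := List.getD_eq_getElem kept 0 hj
      by_cases ht : kept.getD j 0 = f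
      · have : ((i : Int) + 1) = ((i + 1 : Nat) : Int) := by push_cast; ring
        simp only [List.foldl_cons, hj, ht, and_self, if_true, this, ih (j + 1) (acc ++ [(i : Int)]) (i + 1)]
        rw [hdrop, pvGreedy]
        have hk : kept[j] = f := by rw [← hgetD, ht]
        simp [hk]
      · have hcond : ¬ (j < kept.length ∧ kept.getD j 0 = f) := by
          intro h; exact ht h.2
        simp only [List.foldl_cons, if_neg hcond]
        have : ((i : Int) + 1) = ((i + 1 : Nat) : Int) := by push_cast; ring
        rw [this, ih j acc (i + 1), hdrop, pvGreedy]
        have hk : kept[j] ≠ f := by rw [← hgetD]; exact ht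
        simp [Ne.symm hk, ← hdrop]
    · have hcond : ¬ (j < kept.length ∧ kept.getD j 0 = f) := by
        intro h; exact hj h.1
      have hdrop : kept.drop j = [] := List.drop_eq_nil_of_le (by omega)
      simp only [List.foldl_cons, if_neg hcond]
      have : ((i : Int) + 1) = ((i + 1 : Nat) : Int) := by push_cast; ring
      rw [this, ih j acc (i + 1), hdrop, pvGreedy_nil, pvGreedy_nil]

theorem pvBFind_le (full : List Int) (t : Int) :
    ∀ (k pos : Nat), full.length - pos = k → pos ≤ full.length → pvBFind full t pos ≤ full.length := by
  intro k
  induction k with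
  | zero =>
    intro pos hk hle
    have hpos : pos = full.length := by omega
    rw [pvBFind]
    simp [hpos]
  | succ k ih =>
    intro pos hk hle
    rw [pvBFind]
    by_cases h : pos < full.length ∧ full.getD pos 0 ≠ t
    · rw [if_pos h]; exact ih (pos + 1) (by omega) (by omega)
    · rw [if_neg h]; exact hle

theorem lemF (full : List Int) (t : Int) (kt : List Int) :
    ∀ (k pos : Nat), full.length - pos = k → pos ≤ full.length →
      pvGreedy (full.drop pos) (t :: kt) pos =
        (if pvBFind full t pos = full.length then []
         else ((pvBFind full t pos : Nat) : Int) ::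
           pvGreedy (full.drop (pvBFind full t pos + 1)) kt (pvBFind full t pos + 1)) := by
  intro k
  induction k with
  | zero =>
    intro pos hk hle
    have hpos : pos = full.length := by omega
    have hdrop : full.drop pos = [] := List.drop_eq_nil_of_le (by omega)
    have hfind : pvBFind full t pos = pos := by rw [pvBFind]; simp [hpos]
    rw [hdrop, hfind, if_pos hpos, pvGreedy]
  | succ k ih =>
    intro pos hk hle
    have hlt : pos < full.length := by omega
    have hdrop : full.drop pos = full[pos] :: full.drop (pos + 1) := List.drop_eq_getElem_cons hlt
    have hgetD : full.getD pos 0 = full[pos] := List.getD_eq_getElem full 0 hlt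
    by_cases h2 : full.getD pos 0 = t
    · have hfind : pvBFind full t pos = pos := by
        rw [pvBFind]; rw [if_neg]; intro h; exact h.2 h2
      have hk2 : full[pos] = t := by rw [← hgetD, h2]
      rw [hfind, if_neg (by omega), hdrop, pvGreedy, if_pos hk2]
    · have hfind : pvBFind full t pos = pvBFind full t (pos + 1) := by
        rw [pvBFind]; rw [if_pos ⟨hlt, fun h => h2 h⟩]
      have hk2 : full[pos] ≠ t := by rw [← hgetD]; exact h2
      rw [hdrop, pvGreedy, if_neg hk2, hfind]
      exact ih (pos + 1) (by omega) (by omega)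

theorem lemB (full : List Int) :
    ∀ (kt : List Int) (pos : Nat), pos ≤ full.length →
      pvBGo full kt pos = pvGreedy (full.drop pos) kt pos := by
  intro kt
  induction kt with
  | nil => intro pos _; rw [pvBGo, pvGreedy_nil]
  | cons t rest ih =>
    intro pos hle
    rw [pvBGo, lemF full t rest (full.length - pos) pos rfl hle]
    by_cases hp : pvBFind full t pos = full.length
    · simp [hp]
    · have hple : pvBFind full t pos ≤ full.length := pvBFind_le full t (full.length - pos) pos rfl hle
      simp only [hp, if_false]
      rw [ih (pvBFind full t pos + 1) (by omega)]

-- ---- B-side referee lemmas: the inverted index + binary search computes pvBFind ----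

-- full specification of the linear cursor scan
theorem pvBFind_spec (full : List Int) (t : Int) :
    ∀ (k pos : Nat), full.length - pos = k → pos ≤ full.length →
      pos ≤ pvBFind full t pos ∧ pvBFind full t pos ≤ full.length ∧
      (∀ i, pos ≤ i → i < pvBFind full t pos → full.getD i 0 ≠ t) ∧
      (pvBFind full t pos < full.length → full.getD (pvBFind full t pos) 0 = t) := by
  intro k
  induction k with
  | zero =>
    intro pos hk hle
    have hpos : pos = full.length := by omega
    have hfind : pvBFind full t pos = pos := by rw [pvBFind]; simp [hpos]
    refine ⟨by omega, by omega, fun i h1 h2 => ?_, fun hlt => ?_⟩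
    · rw [hfind] at h2; exact absurd h2 (by omega)
    · rw [hfind] at hlt; exact absurd hlt (by omega)
  | succ k ih =>
    intro pos hk hle
    by_cases h : pos < full.length ∧ full.getD pos 0 ≠ t
    · have hfind : pvBFind full t pos = pvBFind full t (pos + 1) := by
        rw [pvBFind, if_pos h]
      obtain ⟨h1, h2, h3, h4⟩ := ih (pos + 1) (by omega) (by omega)
      rw [hfind]
      refine ⟨by omega, h2, ?_, h4⟩
      intro i hi1 hi2
      rcases Nat.eq_or_lt_of_le hi1 with he | hl
      · rw [← he]; exact h.2
      · exact h3 i hl hi2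
    · have hfind : pvBFind full t pos = pos := by rw [pvBFind, if_neg h]
      rw [hfind]
      refine ⟨le_refl _, hle, fun i h1 h2 => absurd h2 (by omega), fun hlt => ?_⟩
      by_contra hne
      exact h ⟨hlt, hne⟩

-- occurrence list of token t, as Source B's build loop produces it
def pvPosList (full : List Int) (t : Int) : List Int :=
  ((PySem.List.enumerate full 0).filter (fun p => p.2 == t)).map (fun p => p.1)

theorem pvBuild_getD (t : Int) :
    ∀ (l : List (Int × Int)) (d : PySem.Dict Int (List Int)),
      (l.foldl (fun d p => d.modify p.2 [] (fun v => v ++ [p.1])) d).getD t []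
        = d.getD t [] ++ (l.filter (fun p => p.2 == t)).map (fun p => p.1) := by
  intro l
  induction l with
  | nil => intro d; simp
  | cons p ps ih =>
    intro d
    simp only [List.foldl_cons, List.filter_cons]
    by_cases h : p.2 = t
    · simp only [h, beq_self_eq_true, if_true, List.map_cons, ih]
      rw [PySem.Dict.getD_modify_self]
      simp
    · have hb : (p.2 == t) = false := beq_false_of_ne h
      simp only [hb, Bool.false_eq_true, if_false, ih]
      rw [PySem.Dict.getD_modify_of_ne _ _ _ (Ne.symm h)]

theorem pvBuild_contains (t : Int) :
    ∀ (l : List (Int × Int)) (d : PySem.Dict Int (List Int)),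
      (l.foldl (fun d p => d.modify p.2 [] (fun v => v ++ [p.1])) d).contains t
        = (d.contains t || l.any (fun p => p.2 == t)) := by
  intro l
  induction l with
  | nil => intro d; simp
  | cons p ps ih =>
    intro d
    simp only [List.foldl_cons, List.any_cons, ih, PySem.Dict.contains_modify]
    by_cases h : p.2 = t
    · subst h; simp
    · have hb : (t == p.2) = false := beq_false_of_ne (Ne.symm h)
      have hb2 : (p.2 == t) = false := beq_false_of_ne h
      simp [hb, hb2]

theorem pvBuild_get? (full : List Int) (t : Int) :
    (pvBuild full).get? t =
      if (PySem.List.enumerate full 0).any (fun p => p.2 == t)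
      then some (pvPosList full t) else none := by
  have hc : (pvBuild full).contains t = (PySem.List.enumerate full 0).any (fun p => p.2 == t) := by
    rw [pvBuild, pvBuild_contains]
    simp
  by_cases h : (PySem.List.enumerate full 0).any (fun p => p.2 == t) = true
  · rw [if_pos h]
    have hsome : ((pvBuild full).get? t).isSome := by
      rw [← PySem.Dict.contains_eq_isSome_get?, hc, h]
    obtain ⟨v, hv⟩ := Option.isSome_iff_exists.mp hsome
    rw [hv]
    have := PySem.Dict.getD_eq_get?_getD (pvBuild full) t ([] : List Int)
    rw [hv] at this
    simp only [Option.getD_some] at this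
    rw [← this]
    rw [pvBuild, pvBuild_getD, pvPosList]
    simp
  · rw [if_neg h]
    rw [PySem.Dict.get?_eq_none_iff_contains, hc]
    simp only [Bool.not_eq_true] at h
    exact h

-- elements of pvPosList are exactly the (cast) indices where full carries t
theorem pvPosList_mem (full : List Int) (t : Int) (x : Int) :
    x ∈ pvPosList full t ↔ ∃ k : Nat, ∃ h : k < full.length, x = (k : Int) ∧ full[k] = t := by
  simp only [pvPosList, List.mem_map, List.mem_filter, PySem.List.mem_enumerate_iff]
  constructor
  · rintro ⟨p, ⟨⟨k, hk, hp⟩, hbeq⟩, hx⟩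
    subst hp
    simp only [beq_iff_eq] at hbeq
    exact ⟨k, hk, by simpa using hx.symm, hbeq⟩
  · rintro ⟨k, hk, hx, ht⟩
    exact ⟨((k : Int), full[k]), ⟨⟨k, hk, by simp⟩, by simpa using ht⟩, by simpa using hx.symm⟩

theorem pvPosList_pairwise (full : List Int) (t : Int) :
    (pvPosList full t).Pairwise (· < ·) := by
  apply List.Pairwise.map
  · intro a b h; exact h
  · exact (PySem.List.pairwise_lt_enumerate full 0).filter _

theorem pvPosList_mono (full : List Int) (t : Int) :
    ∀ j k, j ≤ k → k < (pvPosList full t).length →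
      (pvPosList full t).getD j 0 ≤ (pvPosList full t).getD k 0 := by
  intro j k hjk hk
  rcases Nat.eq_or_lt_of_le hjk with he | hl
  · rw [he]
  · have hp := (List.pairwise_iff_getElem).mp (pvPosList_pairwise full t) j k (by omega) hk hl
    rw [List.getD_eq_getElem _ 0 (by omega), List.getD_eq_getElem _ 0 hk]
    exact le_of_lt hp

-- binary search: first index whose element is ≥ cursor (needs monotone list)
theorem pvBS_spec (lst : List Int) (c : Int)
    (hmono : ∀ j k, j ≤ k → k < lst.length → lst.getD j 0 ≤ lst.getD k 0) :
    ∀ (fuel lo hi : Nat), hi - lo ≤ fuel → lo ≤ hi → hi ≤ lst.length →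
      (∀ j, j < lo → lst.getD j 0 < c) →
      (∀ j, hi ≤ j → j < lst.length → ¬ lst.getD j 0 < c) →
      lo ≤ pvBS lst c lo hi ∧ pvBS lst c lo hi ≤ hi ∧
      (∀ j, j < pvBS lst c lo hi → lst.getD j 0 < c) ∧
      (∀ j, pvBS lst c lo hi ≤ j → j < lst.length → c ≤ lst.getD j 0) := by
  intro fuel
  induction fuel with
  | zero =>
    intro lo hi hf h1 h2 hlo hhi
    have he : lo = hi := by omega
    rw [pvBS, if_neg (by omega)]
    exact ⟨le_refl _, by omega, hlo, fun j hj1 hj2 => le_of_not_gt (by subst he; exact hhi j hj1 hj2)⟩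
  | succ fuel ih =>
    intro lo hi hf h1 h2 hlo hhi
    by_cases hlt : lo < hi
    · rw [pvBS, if_pos hlt]
      simp only []
      set mid := (lo + hi) / 2 with hmid
      have hmlo : lo ≤ mid := by omega
      have hmhi : mid < hi := by omega
      by_cases hc : lst.getD mid 0 < c
      · rw [if_pos hc]
        obtain ⟨r1, r2, r3, r4⟩ := ih (mid + 1) hi (by omega) (by omega) h2
          (fun j hj => lt_of_le_of_lt (hmono j mid (by omega) (by omega)) hc) hhi
        exact ⟨by omega, r2, r3, r4⟩
      · rw [if_neg hc]
        obtain ⟨r1, r2, r3, r4⟩ := ih lo mid (by omega) (by omega) (by omega) hlo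
          (fun j hj1 hj2 => fun hlt' => hc (lt_of_le_of_lt (hmono mid j hj1 hj2) hlt'))
        exact ⟨r1, by omega, r3, r4⟩
    · rw [pvBS, if_neg hlt]
      have he : lo = hi := by omega
      exact ⟨le_refl _, by omega, hlo, fun j hj1 hj2 => le_of_not_gt (by subst he; exact hhi j hj1 hj2)⟩

-- the crux: index + binary search step = linear cursor scan step
theorem step_eq (full : List Int) (t : Int) (pos : Nat) (hle : pos ≤ full.length) :
    (match (pvBuild full).get? t with
     | none => pvBFind full t pos = full.length
     | some lst =>
       let lo := pvBS lst (pos : Int) 0 lst.length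
       if lo = lst.length then pvBFind full t pos = full.length
       else pvBFind full t pos < full.length ∧
            lst.getD lo 0 = ((pvBFind full t pos : Nat) : Int)) := by
  obtain ⟨hf1, hf2, hf3, hf4⟩ := pvBFind_spec full t (full.length - pos) pos rfl hle
  set f := pvBFind full t pos with hfdef
  rw [pvBuild_get?]
  by_cases hany : (PySem.List.enumerate full 0).any (fun p => p.2 == t) = true
  · rw [if_pos hany]
    simp only []
    set P := pvPosList full t with hP
    obtain ⟨r1, r2, r3, r4⟩ := pvBS_spec P (pos : Int) (pvPosList_mono full t)
      P.length 0 P.length (by omega) (by omega) (le_refl _)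
      (by intro j hj; omega) (by intro j hj1 hj2; omega)
    set r := pvBS P (pos : Int) 0 P.length with hrdef
    by_cases hfl : f = full.length
    · -- no occurrence of t at or after pos: binary search must hit the end
      rw [if_pos ?_]
      · exact hfl
      · by_contra hne
        have hrlt : r < P.length := by omega
        have hmem : P.getD r 0 ∈ P := by
          rw [List.getD_eq_getElem _ 0 hrlt]; exact List.getElem_mem hrlt
        obtain ⟨k, hk, hxk, hkt⟩ := (pvPosList_mem full t _).mp hmem
        have hge : (pos : Int) ≤ P.getD r 0 := r4 r (le_refl _) hrlt
        have hposk : pos ≤ k := by omega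
        have hklt : k < f := by omega
        exact hf3 k hposk hklt (by rw [List.getD_eq_getElem _ 0 hk]; exact hkt)
    · -- t occurs at f ≥ pos: binary search finds exactly f
      have hflt : f < full.length := by omega
      have hft : full[f] = t := by
        have := hf4 hflt; rwa [List.getD_eq_getElem _ 0 hflt] at this
      have hfmem : ((f : Nat) : Int) ∈ P := (pvPosList_mem full t _).mpr ⟨f, hflt, rfl, hft⟩
      obtain ⟨m, hm, hPm⟩ := List.mem_iff_getElem.mp hfmem
      have hPmD : P.getD m 0 = ((f : Nat) : Int) := by
        rw [List.getD_eq_getElem _ 0 hm]; exact hPm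
      have hrm : r ≤ m := by
        by_contra hgt
        have := r3 m (by omega)
        rw [hPmD] at this
        have : (f : Int) < (pos : Int) := this
        omega
      have hrlt : r < P.length := by omega
      rw [if_neg (by omega)]
      refine ⟨hflt, ?_⟩
      -- P[r] ≥ pos and P[r] ≤ P[m] = f; minimality of f forces equality
      have hge : (pos : Int) ≤ P.getD r 0 := r4 r (le_refl _) hrlt
      have hub : P.getD r 0 ≤ ((f : Nat) : Int) := by
        rw [← hPmD]; exact pvPosList_mono full t r m hrm hm
      have hmemr : P.getD r 0 ∈ P := by
        rw [List.getD_eq_getElem _ 0 hrlt]; exact List.getElem_mem hrlt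
      obtain ⟨k, hk, hxk, hkt⟩ := (pvPosList_mem full t _).mp hmemr
      have hposk : pos ≤ k := by omega
      have hkf : ¬ k < f := by
        intro hlt'
        exact hf3 k hposk hlt' (by rw [List.getD_eq_getElem _ 0 hk]; exact hkt)
      omega
  · rw [if_neg hany]
    simp only []
    -- t appears nowhere in full, so the scan runs to the end
    by_contra hne
    have hflt : f < full.length := by omega
    have hft := hf4 hflt
    apply hany
    rw [List.any_eq_true]
    refine ⟨((f : Int), full[f]), ?_, ?_⟩
    · exact (PySem.List.mem_enumerate_iff _ _ _).mpr ⟨f, hflt, by simp⟩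
    · simp only [beq_iff_eq]
      rwa [List.getD_eq_getElem _ 0 hflt] at hft
  -- end step_eq

theorem lemAlt (full : List Int) :
    ∀ (kt : List Int) (pos : Nat), pos ≤ full.length →
      pvBGoB (pvBuild full) kt (pos : Int) = pvBGo full kt pos := by
  intro kt
  induction kt with
  | nil => intro pos _; rfl
  | cons t rest ih =>
    intro pos hle
    have hstep := step_eq full t pos hle
    obtain ⟨hf1, hf2, hf3, hf4⟩ := pvBFind_spec full t (full.length - pos) pos rfl hle
    rw [pvBGoB, pvBGo]
    cases hg : (pvBuild full).get? t with
    | none =>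
      rw [hg] at hstep
      rw [if_pos hstep]
    | some lst =>
      rw [hg] at hstep
      simp only [] at hstep ⊢
      by_cases hlo : pvBS lst (pos : Int) 0 lst.length = lst.length
      · rw [if_pos hlo] at hstep ⊢
        rw [if_pos hstep]
      · rw [if_neg hlo] at hstep ⊢
        obtain ⟨hflt, heq⟩ := hstep
        rw [if_neg (by omega), heq]
        congr 1
        have hcast : ((pvBFind full t pos : Nat) : Int) + 1
            = ((pvBFind full t pos + 1 : Nat) : Int) := by push_cast; ring
        rw [hcast, ih (pvBFind full t pos + 1) (by omega)]

theorem ports_agree (full kept : List Int) :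
    recover_kept_indices_py full kept = recover_kept_indices_py_alt full kept := by
  unfold recover_kept_indices_py recover_kept_indices_py_alt
  have hA := lemA kept full 0 [] 0
  have hB := lemB full kept 0 (by omega)
  have hAlt := lemAlt full kept 0 (by omega)
  simp only [List.drop_zero, List.nil_append] at hA hB
  rw [Nat.cast_zero] at hA
  rw [hA, ← hB, ← hAlt, Nat.cast_zero]

-- ===== VERDICT (by name: the statement is the Claim_ definition above) =====
theorem recover_kept_indices_py_spec : Claim_equal_recover_kept_indices_py := by
  intro full kept _ _
  unfold Spec_recover_kept_indices_py
  exact ports_agree full kept
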